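-- pv_equiv track=rewrite | github.com/jeffreydebolt/cfo-forecast-refactored | integrated_forecast_display.py | apply_mappings_to_forecasts
-- ===== SOURCE A (Python) =====
-- def apply_mappings_to_forecasts(forecasts, mappings):
--     """Apply vendor mappings to forecast records"""
--     # Create reverse mapping
--     vendor_to_group = {}
--     for group_name, vendors in mappings.items():
--         for vendor in vendors:
--             vendor_to_group[vendor] = group_name
--
--     # Update forecast vendor names
--     for forecast in forecasts:
--         original_vendor = forecast.get('vendor_group_name', '')
--         forecast['display_name'] = vendor_to_group.get(original_vendor, original_vendor)
--
--     return forecasts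
-- ===== SOURCE B (Python) =====
-- def apply_mappings_to_forecasts(forecasts, mappings):
--     """Apply vendor mappings to forecast records"""
--     for forecast in forecasts:
--         original = forecast.get('vendor_group_name', '')
--         display = original
--         for group_name, vendors in mappings.items():
--             if original in vendors:
--                 display = group_name
--         forecast['display_name'] = display
--     return forecasts
-- ===== Notes on version B (the rewrite author's own statement) =====
-- stated objective: alternative
-- what changed: Drops the precomputed reverse vendor-to-group dict; each forecast directly scans the mappings and keeps the last group containing its vendor name.
import Mathlib
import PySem

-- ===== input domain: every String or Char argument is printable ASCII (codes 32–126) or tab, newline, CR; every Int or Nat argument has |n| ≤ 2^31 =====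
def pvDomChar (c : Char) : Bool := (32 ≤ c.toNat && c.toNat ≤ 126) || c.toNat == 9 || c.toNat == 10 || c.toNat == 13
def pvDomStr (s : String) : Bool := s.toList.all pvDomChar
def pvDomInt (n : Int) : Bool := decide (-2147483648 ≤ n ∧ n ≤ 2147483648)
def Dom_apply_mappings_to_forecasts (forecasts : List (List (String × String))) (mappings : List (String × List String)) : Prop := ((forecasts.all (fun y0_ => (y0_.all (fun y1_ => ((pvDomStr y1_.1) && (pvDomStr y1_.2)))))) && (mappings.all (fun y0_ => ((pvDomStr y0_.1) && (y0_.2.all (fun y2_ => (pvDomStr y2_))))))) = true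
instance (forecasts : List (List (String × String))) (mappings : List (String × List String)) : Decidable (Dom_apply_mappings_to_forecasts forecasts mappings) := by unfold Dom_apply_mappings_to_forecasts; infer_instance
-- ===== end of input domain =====

-- B drops A's precomputed reverse vendor->group dict: each forecast scans the mappings directly,
-- keeping the LAST group that contains its vendor name (matching dict-overwrite semantics).
-- Both A and B mutate the forecast dicts in place in Python; the equivalence proved is about the return value.


-- ===== PORT A =====
-- Build the reverse vendor->group dict, then look each forecast's vendor up in it.
def apply_mappings_to_forecasts (forecasts : List (List (String × String))) (mappings : List (String × List String)) : List (List (String × String)) :=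
  let vendor_to_group : PySem.Dict String String :=
    (PySem.Dict.ofList mappings).items.foldl
      (fun d p => p.2.foldl (fun d v => d.insert v p.1) d) PySem.Dict.empty
  forecasts.map (fun forecast =>
    let fd := PySem.Dict.ofList forecast
    let original_vendor := fd.getD "vendor_group_name" ""
    (fd.insert "display_name" (vendor_to_group.getD original_vendor original_vendor)).items)

-- ===== PORT B =====
-- Per forecast: scan mappings, last group containing the vendor wins; default is the original name.
def apply_mappings_to_forecasts_alt (forecasts : List (List (String × String))) (mappings : List (String × List String)) : List (List (String × String)) :=
  forecasts.map (fun forecast =>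
    let fd := PySem.Dict.ofList forecast
    let original := fd.getD "vendor_group_name" ""
    let display := (PySem.Dict.ofList mappings).items.foldl
      (fun acc p => if p.2.contains original then p.1 else acc) original
    (fd.insert "display_name" display).items)

-- ===== PRECONDITION & SPEC =====
def Spec_apply_mappings_to_forecasts (forecasts : List (List (String × String))) (mappings : List (String × List String)) (out : List (List (String × String))) : Prop := out = apply_mappings_to_forecasts_alt forecasts mappings
instance (forecasts : List (List (String × String))) (mappings : List (String × List String)) (out : List (List (String × String))) : Decidable (Spec_apply_mappings_to_forecasts forecasts mappings out) := by unfold Spec_apply_mappings_to_forecasts; infer_instance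

-- ===== CLAIM (what is proved, stated in full; the proofs are below) =====
def Claim_equal_apply_mappings_to_forecasts : Prop := ∀ (forecasts : List (List (String × String))) (mappings : List (String × List String)), Dom_apply_mappings_to_forecasts forecasts mappings → Spec_apply_mappings_to_forecasts forecasts mappings (apply_mappings_to_forecasts forecasts mappings)

-- ===== LEMMAS AND PROOFS =====

-- Inner loop of A's dict build: inserting every vendor of one group.
theorem getD_insert_group (vs : List String) (g : String) (d : PySem.Dict String String) (k dflt : String) :
    ((vs.foldl (fun d v => d.insert v g) d).getD k dflt)
      = if vs.contains k then g else d.getD k dflt := by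
  induction vs generalizing d with
  | nil => simp
  | cons v vs ih =>
    simp only [List.foldl_cons, ih, List.contains_cons]
    rw [PySem.Dict.getD_insert]
    by_cases hk : k = v <;> by_cases hm : vs.contains k <;> simp [hk, hm]

-- Outer loop: looking up k in A's reverse dict equals B's last-match scan.
theorem getD_build_eq_scan (ms : List (String × List String)) (d : PySem.Dict String String) (k dflt : String) :
    ((ms.foldl (fun d p => p.2.foldl (fun d v => d.insert v p.1) d) d).getD k dflt)
      = ms.foldl (fun acc p => if p.2.contains k then p.1 else acc) (d.getD k dflt) := by
  induction ms generalizing d with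
  | nil => rfl
  | cons m ms ih =>
    simp only [List.foldl_cons, ih, getD_insert_group]

-- ===== VERDICT (by name: the statement is the Claim_ definition above) =====
theorem apply_mappings_to_forecasts_spec : Claim_equal_apply_mappings_to_forecasts := by
  intro forecasts mappings _
  unfold Spec_apply_mappings_to_forecasts apply_mappings_to_forecasts apply_mappings_to_forecasts_alt
  simp only [getD_build_eq_scan, PySem.Dict.getD_empty]
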